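-- pv_equiv track=rewrite | github.com/simone-chen/aiconfigurator | tests/unit/generator/test_trtllm_extra_engine_args.py | _extract_args_block
-- ===== SOURCE A (Python) =====
-- def _extract_args_block(k8s_yaml: str) -> str:
--     """Extract the bash ``args=(...)`` block from rendered k8s_deploy.yaml."""
--     lines = k8s_yaml.split("\n")
--     collecting = False
--     block: list[str] = []
--     for line in lines:
--         stripped = line.strip()
--         if "args=(" in stripped:
--             collecting = True
--             block = [stripped]
--             continue
--         if collecting:
--             block.append(stripped)
--             if stripped == ")":
--                 break
--     return "\n".join(block)
-- ===== SOURCE B (Python) =====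
-- def _extract_args_block(k8s_yaml: str) -> str:
--     """Extract the bash ``args=(...)`` block from rendered k8s_deploy.yaml."""
--     s = [line.strip() for line in k8s_yaml.split("\n")]
--     for f, line in enumerate(s):
--         if "args=(" in line:
--             break
--     else:
--         return ""
--     for e in range(f + 1, len(s)):
--         if s[e] == ")":
--             return "\n".join(s[f:e + 1])
--     return "\n".join(s[f:])
-- ===== Notes on version B (the rewrite author's own statement) =====
-- stated objective: alternative
-- what changed: A's incremental collecting/reset state machine is replaced by position-finding (index of the first 'args=(' line, index of the first ')' line after it) followed by a single slice; Pre_ excludes inputs with a second 'args=(' line strictly between the first one and its terminating ')' line, a first-vs-last-match corner nobody would specify, where A keeps the last start and B the first.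
-- outside the precondition, e.g. on _extract_args_block('args=(\nargs=(a\n)'): A returns 'args=(a\n)', B returns 'args=(\nargs=(a\n)'
import Mathlib
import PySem

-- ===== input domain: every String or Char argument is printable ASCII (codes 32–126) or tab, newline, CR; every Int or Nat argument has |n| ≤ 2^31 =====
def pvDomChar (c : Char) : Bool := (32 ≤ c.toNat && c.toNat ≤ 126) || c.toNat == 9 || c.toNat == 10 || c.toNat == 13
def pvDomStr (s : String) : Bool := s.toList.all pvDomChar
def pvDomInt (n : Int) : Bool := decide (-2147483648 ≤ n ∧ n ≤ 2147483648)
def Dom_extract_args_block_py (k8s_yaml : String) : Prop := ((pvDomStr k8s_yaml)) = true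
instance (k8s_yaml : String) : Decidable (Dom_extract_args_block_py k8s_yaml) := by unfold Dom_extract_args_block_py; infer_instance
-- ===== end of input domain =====

-- B replaces A's incremental collecting/reset state machine by position-finding
-- (first 'args=(' line, first ')' line after it) followed by a single slice
-- (objective: alternative decomposition); Pre_ excludes the first-vs-last-match corner
-- where a second 'args=(' line sits inside the block.

-- ===== PORT A =====
-- the for-loop of A: state = (collecting, block); 'break' = returning without recursing
def pvALoop : List String → Bool → List String → List String
  | [], _, block => block
  | line :: rest, collecting, block =>
    let stripped := PySem.Str.strip line
    if PySem.Str.isIn "args=(" stripped then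
      pvALoop rest true [stripped]
    else if collecting then
      if stripped == ")" then block ++ [stripped]
      else pvALoop rest collecting (block ++ [stripped])
    else
      pvALoop rest collecting block

def extract_args_block_py (k8s_yaml : String) : String :=
  let lines := (PySem.Str.split? k8s_yaml "\n").getD []
  PySem.Str.join "\n" (pvALoop lines false [])

-- ===== PORT B =====
-- the two line predicates B (and Pre_) speak about
def pvP (x : String) : Bool := PySem.Str.isIn "args=(" x
def pvC (x : String) : Bool := x == ")"

-- B's first loop: 'for f, line in enumerate(s): if "args=(" in line: break / else: return ""'
def pvBFindStart : List String → Nat → Option Nat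
  | [], _ => none
  | line :: rest, f =>
    if pvP line then some f else pvBFindStart rest (f + 1)

-- B's second loop: 'for e in range(f+1, len(s)): if s[e] == ")": …' run over s[f+1:]
def pvBScan : List String → Nat → Option Nat
  | [], _ => none
  | x :: rest, e => if pvC x then some e else pvBScan rest (e + 1)

def extract_args_block_py_alt (k8s_yaml : String) : String :=
  let s := ((PySem.Str.split? k8s_yaml "\n").getD []).map PySem.Str.strip
  match pvBFindStart s 0 with
  | none => ""
  | some f =>
    match pvBScan (s.drop (f + 1)) (f + 1) with
    | some e => PySem.Str.join "\n" (PySem.List.slice s (some (f : Int)) (some ((e : Int) + 1)))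
    | none => PySem.Str.join "\n" (PySem.List.slice s (some (f : Int)) none)

-- ===== PRECONDITION & SPEC =====
-- helpers Pre_ is phrased with (they do not touch either port)
def pvStripped (k8s_yaml : String) : List String :=
  ((PySem.Str.split? k8s_yaml "\n").getD []).map PySem.Str.strip
-- the lines strictly after a given position up to (excluding) the first ')' line
def pvRegion (r : List String) : List String :=
  match r.findIdx? pvC with
  | some k => r.take k
  | none => r

-- Pre_ excludes inputs with a second 'args=(' line strictly between the first 'args=(' line
-- and its terminating ')' line (or end of input): a first-vs-last-match corner nobody would
-- specify — A keeps the last start there, B the first, and either value is defensible.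
def Pre_extract_args_block_py (k8s_yaml : String) : Prop :=
  (((pvStripped k8s_yaml).findIdx? pvP).all
    (fun f => (pvRegion ((pvStripped k8s_yaml).drop (f + 1))).all (fun y => !pvP y))) = true
instance (k8s_yaml : String) : Decidable (Pre_extract_args_block_py k8s_yaml) := by
  unfold Pre_extract_args_block_py; infer_instance

def pvWitness_extract_args_block_py : String := "cmd:\nargs=(\n--x\n)\nrest"

def Spec_extract_args_block_py (k8s_yaml : String) (out : String) : Prop := out = extract_args_block_py_alt k8s_yaml
instance (k8s_yaml : String) (out : String) : Decidable (Spec_extract_args_block_py k8s_yaml out) := by unfold Spec_extract_args_block_py; infer_instance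

-- ===== CLAIM (what is proved, stated in full; the proofs are below) =====
def Claim_equal_extract_args_block_py : Prop := ∀ (k8s_yaml : String), Dom_extract_args_block_py k8s_yaml → Pre_extract_args_block_py k8s_yaml → Spec_extract_args_block_py k8s_yaml (extract_args_block_py k8s_yaml)

-- ===== LEMMAS AND PROOFS =====

-- A's loop on the already-stripped lines
def pvSLoop : List String → Bool → List String → List String
  | [], _, block => block
  | x :: rest, collecting, block =>
    if pvP x then pvSLoop rest true [x]
    else if collecting then
      if pvC x then block ++ [x]
      else pvSLoop rest collecting (block ++ [x])
    else
      pvSLoop rest collecting block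

theorem pvALoop_eq (lines : List String) : ∀ c b,
    pvALoop lines c b = pvSLoop (lines.map PySem.Str.strip) c b := by
  induction lines with
  | nil => intro c b; rfl
  | cons l rest ih =>
    intro c b
    simp only [pvALoop, pvSLoop, List.map_cons, pvP, pvC]
    split_ifs <;> simp [ih]

theorem pvP_close : pvP ")" = false := by decide

theorem pvC_eq (x : String) (h : pvC x = true) : x = ")" := by
  simpa [pvC] using h

theorem pvSLoop_skip : ∀ (t₁ t₂ : List String) (b : List String),
    (∀ y ∈ t₁, pvP y = false) → pvSLoop (t₁ ++ t₂) false b = pvSLoop t₂ false b := by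
  intro t₁
  induction t₁ with
  | nil => intro t₂ b _; rfl
  | cons x r ih =>
    intro t₂ b h
    have hx : pvP x = false := h x (by simp)
    simp only [List.cons_append, pvSLoop, hx, Bool.false_eq_true, if_false]
    exact ih t₂ b (fun y hy => h y (by simp [hy]))

theorem pvSLoop_all_false : ∀ (t b : List String),
    (∀ y ∈ t, pvP y = false) → pvSLoop t false b = b := by
  intro t
  induction t with
  | nil => intro b _; rfl
  | cons x r ih =>
    intro b h
    have hx : pvP x = false := h x (by simp)
    simp only [pvSLoop, hx, Bool.false_eq_true, if_false]
    exact ih b (fun y hy => h y (by simp [hy]))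

-- under Pre_'s no-second-start condition A's collecting phase never resets:
-- it appends everything up to and including the first ')' line (or to the end)
theorem pvSLoop_true_noreset : ∀ (r b : List String),
    (∀ y ∈ pvRegion r, pvP y = false) →
    pvSLoop r true b =
      b ++ (match r.findIdx? pvC with | some k => r.take (k + 1) | none => r) := by
  intro r
  induction r with
  | nil => intro b _; simp [pvSLoop]
  | cons x r' ih =>
    intro b h
    by_cases hc : pvC x = true
    · have hx : x = ")" := pvC_eq x hc
      subst hx
      simp only [pvSLoop, pvP_close, Bool.false_eq_true, if_false, pvC]
      rw [show List.findIdx? pvC (")" :: r') = some 0 by simp [List.findIdx?_cons, pvC]]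
      simp
    · replace hc : pvC x = false := by simpa using hc
      have hreg : pvRegion (x :: r') =
          x :: (match r'.findIdx? pvC with | some k => r'.take k | none => r') := by
        simp only [pvRegion, List.findIdx?_cons, hc]
        cases r'.findIdx? pvC <;> simp
      have hx : pvP x = false := by
        have := h x; rw [hreg] at this; exact this (by simp)
      have h' : ∀ y ∈ pvRegion r', pvP y = false := by
        intro y hy
        apply h y
        rw [hreg]
        simp only [pvRegion] at hy
        exact List.mem_cons_of_mem x hy
      simp only [pvSLoop, hx, Bool.false_eq_true, if_false, hc]
      rw [ih (b ++ [x]) h']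
      simp only [List.findIdx?_cons, hc]
      cases hf : r'.findIdx? pvC <;> simp

theorem pvFindIdx_none : ∀ (t : List String), (∀ y ∈ t, pvP y = false) →
    t.findIdx? pvP = none := by
  intro t h
  exact List.findIdx?_eq_none_iff.2 (fun y hy => by simp [h y hy])

theorem pvFindIdx_decomp (t₁ : List String) (x : String) (r : List String)
    (h₁ : ∀ y ∈ t₁, pvP y = false) (hx : pvP x = true) :
    (t₁ ++ x :: r).findIdx? pvP = some t₁.length := by
  induction t₁ with
  | nil => simp [List.findIdx?_cons, hx]
  | cons z t ih =>
    have hz : pvP z = false := h₁ z (by simp)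
    simp only [List.cons_append, List.findIdx?_cons, hz]
    rw [ih (fun y hy => h₁ y (by simp [hy]))]
    simp

theorem pvBFindStart_eq : ∀ (t : List String) (i : Nat),
    pvBFindStart t i = (t.findIdx? pvP).map (fun k => i + k) := by
  intro t
  induction t with
  | nil => intro i; rfl
  | cons x r ih =>
    intro i
    simp only [pvBFindStart, List.findIdx?_cons]
    by_cases hx : pvP x = true
    · simp [hx]
    · replace hx : pvP x = false := by simpa using hx
      simp only [hx, Bool.false_eq_true, if_false, ih (i + 1)]
      cases r.findIdx? pvP <;> simp <;> omega

theorem pvBScan_eq : ∀ (r : List String) (e : Nat),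
    pvBScan r e = (r.findIdx? pvC).map (fun k => e + k) := by
  intro r
  induction r with
  | nil => intro e; rfl
  | cons x r' ih =>
    intro e
    simp only [pvBScan, List.findIdx?_cons]
    by_cases hx : pvC x = true
    · simp [hx]
    · replace hx : pvC x = false := by simpa using hx
      simp only [hx, Bool.false_eq_true, if_false, ih (e + 1)]
      cases r'.findIdx? pvC <;> simp <;> omega

theorem pv_first_decomp : ∀ (t : List String),
    (∀ y ∈ t, pvP y = false) ∨
      ∃ t₁ x r, t = t₁ ++ x :: r ∧ (∀ y ∈ t₁, pvP y = false) ∧ pvP x = true := by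
  intro t
  induction t with
  | nil => left; simp
  | cons x r ih =>
    by_cases hx : pvP x = true
    · right; exact ⟨[], x, r, by simp, by simp, hx⟩
    · replace hx : pvP x = false := by simpa using hx
      rcases ih with h | ⟨t₁, y, r', rfl, h₁, hy⟩
      · left; intro z hz; rcases List.mem_cons.1 hz with rfl | hz; exacts [hx, h z hz]
      · right
        exact ⟨x :: t₁, y, r', by simp, by
          intro z hz; rcases List.mem_cons.1 hz with rfl | hz; exacts [hx, h₁ z hz], hy⟩

-- ===== VERDICT (by name: the statement is the Claim_ definition above) =====
theorem extract_args_block_py_spec : Claim_equal_extract_args_block_py := by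
  intro k8s_yaml _ hpre
  simp only [Spec_extract_args_block_py, extract_args_block_py, extract_args_block_py_alt]
  rw [pvALoop_eq]
  have ht : ((PySem.Str.split? k8s_yaml "\n").getD []).map PySem.Str.strip =
      pvStripped k8s_yaml := rfl
  rw [ht]
  set t := pvStripped k8s_yaml with htdef
  rcases pv_first_decomp t with h | ⟨t₁, x, r, hdec, h₁, hx⟩
  · rw [pvSLoop_all_false t [] h, pvBFindStart_eq, pvFindIdx_none t h]
    rfl
  · have hf : t.findIdx? pvP = some t₁.length := hdec ▸ pvFindIdx_decomp t₁ x r h₁ hx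
    have hdropf : t.drop t₁.length = x :: r := by rw [hdec]; exact List.drop_left
    have hdropf1 : t.drop (t₁.length + 1) = r := by
      have hdd := List.drop_drop (i := 1) (j := t₁.length) (l := t)
      rw [← hdd, hdropf]
      rfl
    -- Pre_ gives: no second start in the region after the first start
    have hreg : ∀ y ∈ pvRegion r, pvP y = false := by
      unfold Pre_extract_args_block_py at hpre
      rw [← htdef, hf] at hpre
      simp only [Option.all_some, List.all_eq_true, Bool.not_eq_eq_eq_not, Bool.not_true] at hpre
      intro y hy
      have := hpre y
      rw [hdropf1] at this
      exact this hy
    rw [pvBFindStart_eq, hf]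
    simp only [Option.map_some, Nat.zero_add]
    rw [hdropf1, pvBScan_eq]
    -- A's side after skipping the prefix and entering collecting mode at x
    rw [hdec, pvSLoop_skip t₁ (x :: r) [] h₁,
      show pvSLoop (x :: r) false [] = pvSLoop r true [x] by simp [pvSLoop, hx],
      pvSLoop_true_noreset r [x] hreg, ← hdec]
    cases hfc : r.findIdx? pvC with
    | none =>
      simp only [Option.map_none]
      rw [PySem.List.slice_from_natCast, hdropf, List.singleton_append]
    | some j =>
      simp only [Option.map_some]
      rw [show ((((t₁.length + 1 + j : Nat)) : Int) + 1) = (((t₁.length + 1 + j + 1 : Nat)) : Int) by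
        push_cast; ring]
      rw [PySem.List.slice_natCast]
      rw [show t₁.length + 1 + j + 1 - t₁.length = j + 2 by omega]
      rw [hdropf]
      simp
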